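-- pv_equiv track=rewrite | github.com/zlatin-r/Exercise-Tasks | scramblies.py | scramble
-- ===== SOURCE A (Python) =====
-- def scramble(s1, s2):
--     letters = list(s1)
--     for i in range(len(s2)):
--         el = s2[i]
--         if el not in letters:
--             return False
--         letters.remove(el)
--     return True
-- ===== SOURCE B (Python) =====
-- def scramble(s1, s2):
--     return all(s2.count(c) <= s1.count(c) for c in set(s2))
-- ===== Notes on version B (the rewrite author's own statement) =====
-- stated objective: faster
-- what changed: Replaces A's mutating scan (membership test + list.remove per character of s2, each an O(len) pass) with a per-distinct-character count comparison: multiset containment holds iff every distinct character of s2 occurs at least as often in s1.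
import Mathlib
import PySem

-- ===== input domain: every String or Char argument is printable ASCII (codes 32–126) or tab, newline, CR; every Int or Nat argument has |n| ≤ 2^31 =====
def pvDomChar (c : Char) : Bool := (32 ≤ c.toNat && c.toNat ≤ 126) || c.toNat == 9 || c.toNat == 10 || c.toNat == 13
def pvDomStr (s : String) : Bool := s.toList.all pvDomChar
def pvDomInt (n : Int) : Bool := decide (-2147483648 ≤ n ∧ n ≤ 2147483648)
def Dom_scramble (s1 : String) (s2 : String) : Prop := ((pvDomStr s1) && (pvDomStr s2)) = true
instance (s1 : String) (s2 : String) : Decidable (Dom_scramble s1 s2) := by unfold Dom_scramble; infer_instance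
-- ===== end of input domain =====

-- B replaces A's mutating scan (membership + list.remove per char of s2) with a per-distinct-character
-- count comparison (C-speed str.count per distinct char); measured faster in a timing run.

-- ===== PORT A =====
-- A's loop over i in range(len(s2)): el = s2[i]; if el not in letters: return False; letters.remove(el).
-- Transcribed as structural recursion over s2's characters with `letters` as loop state;
-- list.remove(el) under the membership guard = erase of the first occurrence (List.erase).
def scrambleLoopA (letters : List Char) (rest : List Char) : Bool :=
  match rest with
  | [] => true
  | el :: r => if letters.contains el then scrambleLoopA (letters.erase el) r else false

def scramble (s1 : String) (s2 : String) : Bool :=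
  scrambleLoopA s1.toList s2.toList

-- ===== PORT B =====
-- all(s2.count(c) <= s1.count(c) for c in set(s2)); str.count of a single character
-- equals the character count over the string's characters (exact for length-1 needles).
def scramble_alt (s1 : String) (s2 : String) : Bool :=
  (PySem.Set.ofList s2.toList).all (fun c => s2.toList.count c ≤ s1.toList.count c)

-- ===== PRECONDITION & SPEC =====
def Spec_scramble (s1 : String) (s2 : String) (out : Bool) : Prop := out = scramble_alt s1 s2
instance (s1 : String) (s2 : String) (out : Bool) : Decidable (Spec_scramble s1 s2 out) := by unfold Spec_scramble; infer_instance

-- ===== CLAIM (what is proved, stated in full; the proofs are below) =====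
def Claim_equal_scramble : Prop := ∀ (s1 : String) (s2 : String), Dom_scramble s1 s2 → Spec_scramble s1 s2 (scramble s1 s2)

-- ===== LEMMAS AND PROOFS =====

-- A's loop succeeds iff every character occurs in `letters` at least as often as in `rest`.
theorem scrambleLoopA_iff (rest letters : List Char) :
    scrambleLoopA letters rest = true ↔ ∀ c, rest.count c ≤ letters.count c := by
  induction rest generalizing letters with
  | nil => simp [scrambleLoopA]
  | cons el r ih =>
    by_cases h : el ∈ letters
    · rw [scrambleLoopA, if_pos (by simpa using h), ih]
      have hp : 0 < letters.count el := List.count_pos_iff.mpr h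
      constructor
      · intro H c
        have h1 := H c
        rw [List.count_erase] at h1
        rw [List.count_cons]
        by_cases hc : (el == c) = true
        · rw [if_pos hc] at h1 ⊢
          have hp' : 0 < List.count c letters := by
            rw [← show el = c from by simpa using hc]; exact hp
          omega
        · rw [if_neg hc] at h1 ⊢
          omega
      · intro H c
        have h1 := H c
        rw [List.count_cons] at h1
        rw [List.count_erase]
        by_cases hc : (el == c) = true
        · rw [if_pos hc] at h1 ⊢
          omega
        · rw [if_neg hc] at h1 ⊢
          omega
    · rw [scrambleLoopA, if_neg (by simpa using h)]
      simp only [Bool.false_eq_true, false_iff, not_forall, not_le]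
      refine ⟨el, ?_⟩
      have h0 : List.count el letters = 0 := List.count_eq_zero.mpr h
      simp only [List.count_cons_self, h0]
      omega

-- B succeeds iff the same count condition holds for every character
-- (characters outside s2 have count 0 in s2, so restricting to set(s2) loses nothing).
theorem scramble_alt_iff (s1 s2 : String) :
    scramble_alt s1 s2 = true ↔ ∀ c, s2.toList.count c ≤ s1.toList.count c := by
  unfold scramble_alt
  rw [List.all_eq_true]
  constructor
  · intro H c
    by_cases hc : c ∈ s2.toList
    · simpa using H c ((PySem.Set.mem_ofList _ _).mpr hc)
    · simp [List.count_eq_zero_of_not_mem hc]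
  · intro H c _
    simpa using H c

-- ===== VERDICT (by name: the statement is the Claim_ definition above) =====
theorem scramble_spec : Claim_equal_scramble := by
  intro s1 s2 _
  unfold Spec_scramble scramble
  rw [Bool.eq_iff_iff, scrambleLoopA_iff, scramble_alt_iff]
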